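-- pv_equiv track=rewrite | github.com/Cow-Kite/PS | 백준/Silver/9095. 1， 2， 3 더하기/1， 2， 3 더하기.py | solution
-- ===== SOURCE A (Python) =====
-- def solution(N):
--     if N == 1:
--         return 1
--     if N == 2:
--         return 2
--     if N == 3:
--         return 4
--
--     arr = [0] * (N+1)
--     arr[1], arr[2], arr[3] = 1, 2, 4
--
--     for i in range(4, N+1):
--         arr[i] = arr[i-1] + arr[i-2] + arr[i-3]
--
--     return arr[N]
-- ===== SOURCE B (Python) =====
-- def solution(N):
--     # Fast exact reimplementation: 3x3 tribonacci transition matrix raised by binary exponentiation.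
--     if N == 1:
--         return 1
--     if N == 2:
--         return 2
--     if N == 3:
--         return 4
--     def mul(X, Y):
--         return (
--             (X[0][0]*Y[0][0] + X[0][1]*Y[1][0] + X[0][2]*Y[2][0],
--              X[0][0]*Y[0][1] + X[0][1]*Y[1][1] + X[0][2]*Y[2][1],
--              X[0][0]*Y[0][2] + X[0][1]*Y[1][2] + X[0][2]*Y[2][2]),
--             (X[1][0]*Y[0][0] + X[1][1]*Y[1][0] + X[1][2]*Y[2][0],
--              X[1][0]*Y[0][1] + X[1][1]*Y[1][1] + X[1][2]*Y[2][1],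
--              X[1][0]*Y[0][2] + X[1][1]*Y[1][2] + X[1][2]*Y[2][2]),
--             (X[2][0]*Y[0][0] + X[2][1]*Y[1][0] + X[2][2]*Y[2][0],
--              X[2][0]*Y[0][1] + X[2][1]*Y[1][1] + X[2][2]*Y[2][1],
--              X[2][0]*Y[0][2] + X[2][1]*Y[1][2] + X[2][2]*Y[2][2]),
--         )
--     M = ((1, 1, 1), (1, 0, 0), (0, 1, 0))
--     def matpow(e):
--         if e == 0:
--             return ((1, 0, 0), (0, 1, 0), (0, 0, 1))
--         h = matpow(e // 2)
--         h2 = mul(h, h)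
--         return h2 if e % 2 == 0 else mul(h2, M)
--     P = matpow(N - 3)
--     # (f(N), f(N-1), f(N-2)) = P @ (f(3), f(2), f(1))
--     return P[0][0] * 4 + P[0][1] * 2 + P[0][2] * 1
-- ===== Notes on version B (the rewrite author's own statement) =====
-- stated objective: faster
-- what changed: Replaced the O(N) DP array that fills every tribonacci value up to N with binary exponentiation of the 3x3 tribonacci transition matrix, computing only O(log N) matrix products.
-- outside the precondition, e.g. on solution(0): A raises IndexError, B raises RecursionError
import Mathlib
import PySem

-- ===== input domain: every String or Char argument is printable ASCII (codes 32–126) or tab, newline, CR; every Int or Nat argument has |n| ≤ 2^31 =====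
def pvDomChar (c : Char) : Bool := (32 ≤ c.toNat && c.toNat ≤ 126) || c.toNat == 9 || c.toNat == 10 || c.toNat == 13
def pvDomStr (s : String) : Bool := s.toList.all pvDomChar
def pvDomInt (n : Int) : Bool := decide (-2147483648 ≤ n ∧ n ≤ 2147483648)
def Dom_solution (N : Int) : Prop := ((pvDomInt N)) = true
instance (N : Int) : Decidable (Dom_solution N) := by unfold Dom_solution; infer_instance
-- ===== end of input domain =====

-- B replaces A's O(N) DP array with binary exponentiation of the 3x3 tribonacci
-- transition matrix; equal on all N ≥ 1 (A raises IndexError otherwise).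

-- ===== PORT A =====
-- Literal port of A: fill arr[0..N], arr[i] = arr[i-1]+arr[i-2]+arr[i-3], return arr[N].
-- pySetD/pyGetD are the total forms of arr[i]=v / arr[i]; under Pre_solution every index is in range.
def solution (N : Int) : Int :=
  if N = 1 then 1
  else if N = 2 then 2
  else if N = 3 then 4
  else
    let arr := List.replicate (N + 1).toNat (0 : Int)
    let arr := PySem.List.pySetD (PySem.List.pySetD (PySem.List.pySetD arr 1 1) 2 2) 3 4
    let arr := (PySem.List.pyRange 4 (N + 1) 1).foldl
      (fun a i => PySem.List.pySetD a i
        (PySem.List.pyGetD a (i - 1) 0 + PySem.List.pyGetD a (i - 2) 0 +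
          PySem.List.pyGetD a (i - 3) 0)) arr
    PySem.List.pyGetD arr N 0

-- ===== PORT B =====
-- 3x3 integer matrix, rows (a b c / d e f / g h i).
structure M3 where
  a : Int
  b : Int
  c : Int
  d : Int
  e : Int
  f : Int
  g : Int
  h : Int
  i : Int
deriving DecidableEq, Repr

def M3.mul (X Y : M3) : M3 :=
  ⟨X.a*Y.a + X.b*Y.d + X.c*Y.g, X.a*Y.b + X.b*Y.e + X.c*Y.h, X.a*Y.c + X.b*Y.f + X.c*Y.i,
   X.d*Y.a + X.e*Y.d + X.f*Y.g, X.d*Y.b + X.e*Y.e + X.f*Y.h, X.d*Y.c + X.e*Y.f + X.f*Y.i,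
   X.g*Y.a + X.h*Y.d + X.i*Y.g, X.g*Y.b + X.h*Y.e + X.i*Y.h, X.g*Y.c + X.h*Y.f + X.i*Y.i⟩

def M3.one : M3 := ⟨1, 0, 0, 0, 1, 0, 0, 0, 1⟩

def tribM : M3 := ⟨1, 1, 1, 1, 0, 0, 0, 1, 0⟩

-- Source B's recursive matpow; the exponent N-3 is nonnegative under Pre_, so it is ported as a Nat.
def matpow : Nat → M3
  | 0 => M3.one
  | n + 1 =>
    let h := matpow ((n + 1) / 2)
    let h2 := h.mul h
    if (n + 1) % 2 = 0 then h2 else h2.mul tribM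
termination_by n => n
decreasing_by omega

def solution_alt (N : Int) : Int :=
  if N = 1 then 1
  else if N = 2 then 2
  else if N = 3 then 4
  else
    let P := matpow (N - 3).toNat
    P.a * 4 + P.b * 2 + P.c * 1

-- ===== PRECONDITION & SPEC =====
-- A raises IndexError for every N ≤ 0 (the DP array is too short for the base-case stores).
def Pre_solution (N : Int) : Prop := 1 ≤ N
instance (N : Int) : Decidable (Pre_solution N) := by unfold Pre_solution; infer_instance
def pvWitness_solution : Int := (5)

def Spec_solution (N : Int) (out : Int) : Prop := out = solution_alt N
instance (N : Int) (out : Int) : Decidable (Spec_solution N out) := by unfold Spec_solution; infer_instance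

-- ===== CLAIM (what is proved, stated in full; the proofs are below) =====
def Claim_equal_solution : Prop := ∀ (N : Int), Dom_solution N → Pre_solution N → Spec_solution N (solution N)

-- ===== LEMMAS AND PROOFS =====

-- Reference tribonacci sequence (trib 1 = 1, trib 2 = 2, trib 3 = 4).
def trib : Nat → Int
  | 0 => 0
  | 1 => 1
  | 2 => 2
  | 3 => 4
  | n + 4 => trib (n + 3) + trib (n + 2) + trib (n + 1)

lemma trib_rec (t : Nat) (ht : 3 ≤ t) :
    trib (t + 1) = trib t + trib (t - 1) + trib (t - 2) := by
  obtain ⟨k, hk⟩ := Nat.le.dest ht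
  rw [← hk, show 3 + k + 1 = k + 4 from by omega, show 3 + k = k + 3 from by omega,
    show k + 3 - 1 = k + 2 from by omega, show k + 3 - 2 = k + 1 from by omega]
  rfl

-- simple iterated power, the bridge between matpow and trib
def npowM (m : M3) : Nat → M3
  | 0 => M3.one
  | n + 1 => m.mul (npowM m n)

lemma M3.mulAssoc (x y z : M3) : (x.mul y).mul z = x.mul (y.mul z) := by
  cases x; cases y; cases z
  simp only [M3.mul, M3.mk.injEq]
  refine ⟨by ring, by ring, by ring, by ring, by ring, by ring, by ring, by ring, by ring⟩

lemma M3.oneMul (x : M3) : M3.one.mul x = x := by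
  cases x; simp [M3.mul, M3.one]

lemma M3.mulOne (x : M3) : x.mul M3.one = x := by
  cases x; simp [M3.mul, M3.one]

lemma npowM_add (m : M3) (a b : Nat) : npowM m (a + b) = (npowM m a).mul (npowM m b) := by
  induction a with
  | zero => simp [npowM, M3.oneMul]
  | succ a ih =>
    rw [show a + 1 + b = a + b + 1 from by omega]
    simp [npowM, ih, M3.mulAssoc]

lemma matpow_eq_npowM : ∀ n, matpow n = npowM tribM n := by
  intro n
  induction n using Nat.strong_induction_on with
  | _ n ih =>
    match n with
    | 0 => rw [matpow]; rfl
    | n + 1 =>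
      rw [matpow]
      have hq : matpow ((n + 1) / 2) = npowM tribM ((n + 1) / 2) := ih _ (by omega)
      simp only [hq]
      by_cases hp : (n + 1) % 2 = 0
      · have h1 : (n + 1) / 2 + (n + 1) / 2 = n + 1 := by omega
        have : npowM tribM (n + 1) =
            (npowM tribM ((n + 1) / 2)).mul (npowM tribM ((n + 1) / 2)) := by
          conv_lhs => rw [← h1]
          rw [npowM_add]
        simp [hp, this]
      · have h1 : (n + 1) / 2 + (n + 1) / 2 + 1 = n + 1 := by omega
        have : npowM tribM (n + 1) =
            ((npowM tribM ((n + 1) / 2)).mul (npowM tribM ((n + 1) / 2))).mul tribM := by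
          conv_lhs => rw [← h1]
          rw [npowM_add, npowM_add]
          simp [npowM, M3.mulAssoc, M3.mulOne]
        simp [hp, this]

lemma npowM_rows (k : Nat) :
    ((npowM tribM k).a * 4 + (npowM tribM k).b * 2 + (npowM tribM k).c = trib (k + 3)) ∧
    ((npowM tribM k).d * 4 + (npowM tribM k).e * 2 + (npowM tribM k).f = trib (k + 2)) ∧
    ((npowM tribM k).g * 4 + (npowM tribM k).h * 2 + (npowM tribM k).i = trib (k + 1)) := by
  induction k with
  | zero => refine ⟨rfl, rfl, rfl⟩
  | succ k ih =>
    obtain ⟨h1, h2, h3⟩ := ih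
    have ta : tribM.a = 1 := rfl
    have tb : tribM.b = 1 := rfl
    have tc : tribM.c = 1 := rfl
    have td : tribM.d = 1 := rfl
    have te : tribM.e = 0 := rfl
    have tf : tribM.f = 0 := rfl
    have tg : tribM.g = 0 := rfl
    have th : tribM.h = 1 := rfl
    have ti : tribM.i = 0 := rfl
    refine ⟨?_, ?_, ?_⟩
    · rw [show k + 1 + 3 = k + 4 from by omega, show trib (k + 4) = trib (k+3) + trib (k+2) + trib (k+1) from rfl]
      simp only [npowM, M3.mul, ta, tb, tc, td, te, tf, tg, th, ti]
      linarith
    · rw [show k + 1 + 2 = k + 3 from by omega]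
      simp only [npowM, M3.mul, ta, tb, tc, td, te, tf, tg, th, ti]
      linarith
    · rw [show k + 1 + 1 = k + 2 from by omega]
      simp only [npowM, M3.mul, ta, tb, tc, td, te, tf, tg, th, ti]
      linarith

lemma alt_eq_trib (N : Int) (h4 : 4 ≤ N) : solution_alt N = trib N.toNat := by
  have h1 : N ≠ 1 := by omega
  have h2 : N ≠ 2 := by omega
  have h3 : N ≠ 3 := by omega
  simp only [solution_alt, h1, h2, h3, if_false, matpow_eq_npowM]
  have hrow := (npowM_rows (N - 3).toNat).1
  rw [show (N - 3).toNat + 3 = N.toNat from by omega] at hrow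
  simpa using hrow

-- ----- A side -----

def stepA (a : List Int) (i : Int) : List Int :=
  PySem.List.pySetD a i
    (PySem.List.pyGetD a (i - 1) 0 + PySem.List.pyGetD a (i - 2) 0 +
      PySem.List.pyGetD a (i - 3) 0)

def initA (N : Int) : List Int :=
  PySem.List.pySetD (PySem.List.pySetD
    (PySem.List.pySetD (List.replicate (N + 1).toNat (0 : Int)) 1 1) 2 2) 3 4

lemma initA_eq (N : Int) :
    initA N = (((List.replicate (N + 1).toNat (0 : Int)).set 1 1).set 2 2).set 3 4 := by
  simp [initA, PySem.List.pySetD_of_nonneg]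

lemma loop_inv (N : Int) (hN : 4 ≤ N) :
    ∀ m : Int, 3 ≤ m → m ≤ N →
      ((PySem.List.pyRange 4 (m + 1) 1).foldl stepA (initA N)).length = (N + 1).toNat ∧
      ∀ j : Nat, (j : Int) ≤ m →
        ((PySem.List.pyRange 4 (m + 1) 1).foldl stepA (initA N)).getD j 0 = trib j := by
  intro m hm
  induction m, hm using Int.le_induction with
  | base =>
    intro _
    rw [show (3:Int) + 1 = 4 from rfl, PySem.List.pyRange_one_eq_nil le_rfl, List.foldl_nil, initA_eq]
    have hlen : 4 < (N + 1).toNat := by omega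
    have l0 : 0 < (N + 1).toNat := by omega
    have l1 : 1 < (N + 1).toNat := by omega
    have l2 : 2 < (N + 1).toNat := by omega
    have l3 : 3 < (N + 1).toNat := by omega
    constructor
    · simp
    · intro j hj
      have hj3 : j ≤ 3 := by omega
      interval_cases j <;>
        simp [List.getD, trib, l0, l1, l2, l3]
  | succ m hm3 ih =>
    intro hmN
    obtain ⟨hlen, hval⟩ := ih (by omega)
    rw [PySem.List.pyRange_one_succ_right (by omega :(4:Int) ≤ m + 1), List.foldl_append,
      List.foldl_cons, List.foldl_nil]
    set A := (PySem.List.pyRange 4 (m + 1) 1).foldl stepA (initA N) with hA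
    have hmt : (m : Int) = ((m.toNat : Nat) : Int) := by omega
    have hget : ∀ k : Nat, (k : Int) ≤ m → PySem.List.pyGetD A (k : Int) 0 = trib k := by
      intro k hk
      rw [PySem.List.pyGetD_natCast]
      exact hval k hk
    have hv1 : PySem.List.pyGetD A (m + 1 - 1) 0 = trib m.toNat := by
      rw [show m + 1 - 1 = ((m.toNat : Nat) : Int) from by omega]
      exact hget m.toNat (by omega)
    have hv2 : PySem.List.pyGetD A (m + 1 - 2) 0 = trib (m.toNat - 1) := by
      rw [show m + 1 - 2 = ((m.toNat - 1 : Nat) : Int) from by omega]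
      exact hget (m.toNat - 1) (by omega)
    have hv3 : PySem.List.pyGetD A (m + 1 - 3) 0 = trib (m.toNat - 2) := by
      rw [show m + 1 - 3 = ((m.toNat - 2 : Nat) : Int) from by omega]
      exact hget (m.toNat - 2) (by omega)
    have hstep : stepA A (m + 1) = A.set (m + 1).toNat (trib (m.toNat + 1)) := by
      rw [stepA, hv1, hv2, hv3, trib_rec m.toNat (by omega)]
      exact PySem.List.pySetD_of_nonneg A _ (by omega)
    rw [hstep]
    constructor
    · simp [hlen]
    · intro j hj
      by_cases hje : j = (m + 1).toNat
      · subst hje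
        have : (m + 1).toNat < A.length := by omega
        rw [show (m + 1).toNat = m.toNat + 1 from by omega] at this ⊢
        simp [List.getD, this]
      · have hjm : (j : Int) ≤ m := by omega
        rw [List.getD]
        rw [List.getElem?_set_ne (by omega)]
        exact hval j hjm

lemma a_eq_trib (N : Int) (h4 : 4 ≤ N) : solution N = trib N.toNat := by
  have h1 : N ≠ 1 := by omega
  have h2 : N ≠ 2 := by omega
  have h3 : N ≠ 3 := by omega
  simp only [solution, h1, h2, h3, if_false]
  show PySem.List.pyGetD ((PySem.List.pyRange 4 (N + 1) 1).foldl stepA (initA N)) N 0 = _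
  set L := (PySem.List.pyRange 4 (N + 1) 1).foldl stepA (initA N) with hL
  obtain ⟨hlen, hval⟩ := loop_inv N h4 N (by omega) le_rfl
  rw [show (N : Int) = ((N.toNat : Nat) : Int) from by omega, PySem.List.pyGetD_natCast]
  exact hval N.toNat (by omega)

-- ===== VERDICT (by name: the statement is the Claim_ definition above) =====
theorem solution_spec : Claim_equal_solution := by
  intro N _ hpre
  unfold Spec_solution
  by_cases h1 : N = 1
  · simp [solution, solution_alt, h1]
  by_cases h2 : N = 2
  · simp [solution, solution_alt, h2]
  by_cases h3 : N = 3
  · simp [solution, solution_alt, h3]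
  have h4 : 4 ≤ N := by unfold Pre_solution at hpre; omega
  rw [a_eq_trib N h4, alt_eq_trib N h4]
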